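-- pv_equiv track=rewrite | github.com/Sachin-Madan/project_space | saturation_demand_curve.py | identify_plateaus
-- ===== SOURCE A (Python) =====
-- def identify_plateaus(time_series, threshold):
--     plateaus = []
--     plateau_start = None
--
--     for i in range(len(time_series) - 1):
--         if abs(time_series[i] - time_series[i + 1]) < threshold:
--             if plateau_start is None:
--                 plateau_start = i
--         else:
--             if plateau_start is not None:
--                 plateaus.append((plateau_start, i))
--                 plateau_start = None
--
--     if plateau_start is not None:
--         plateaus.append((plateau_start, len(time_series) - 1))
--     return plateaus
-- ===== SOURCE B (Python) =====
-- def identify_plateaus(time_series, threshold):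
--     below = [abs(a - b) < threshold for a, b in zip(time_series, time_series[1:])]
--     plateaus = []
--     i = 0
--     while i < len(below):
--         if below[i]:
--             k = 0
--             while i + 1 + k < len(below) and below[i + 1 + k]:
--                 k += 1
--             plateaus.append((i, i + k + 1))
--             i = i + k + 2
--         else:
--             i += 1
--     return plateaus
-- ===== Notes on version B (the rewrite author's own statement) =====
-- stated objective: alternative
-- what changed: Replaces A's single-pass optional-start state machine with a precomputed boolean mask of adjacent-pair comparisons followed by a run-scanning pass that finds each maximal run of True and emits (start, end_of_run+1) directly.
import Mathlib
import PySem

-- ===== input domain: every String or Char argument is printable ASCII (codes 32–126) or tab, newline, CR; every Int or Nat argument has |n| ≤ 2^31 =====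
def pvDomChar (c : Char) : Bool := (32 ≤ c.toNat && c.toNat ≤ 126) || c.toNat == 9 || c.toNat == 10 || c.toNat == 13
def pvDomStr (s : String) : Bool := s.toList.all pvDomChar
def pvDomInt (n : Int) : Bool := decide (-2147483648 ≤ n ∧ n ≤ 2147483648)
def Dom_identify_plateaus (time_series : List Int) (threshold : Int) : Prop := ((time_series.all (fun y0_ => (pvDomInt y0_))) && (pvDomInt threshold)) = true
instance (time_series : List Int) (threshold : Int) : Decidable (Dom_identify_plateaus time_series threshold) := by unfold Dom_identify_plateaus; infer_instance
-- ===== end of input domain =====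

-- B replaces A's optional-start state machine with a precomputed adjacent-pair mask plus a
-- maximal-run scan (objective: alternative decomposition, same O(n) cost).

-- ===== PORT A =====
-- A's loop body (the state is (plateaus, plateau_start)); used literally in the fold below.
def pvStepA (time_series : List Int) (threshold : Int)
    (st : List (Int × Int) × Option Int) (i : Int) : List (Int × Int) × Option Int :=
  if |PySem.List.pyGetD time_series i 0 - PySem.List.pyGetD time_series (i + 1) 0| < threshold then
    match st.2 with
    | none => (st.1, some i)
    | some _ => st
  else
    match st.2 with
    | some s => (st.1 ++ [(s, i)], none)
    | none => st

def identify_plateaus (time_series : List Int) (threshold : Int) : List (Int × Int) :=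
  let r := (PySem.List.pyRange 0 ((time_series.length : Int) - 1) 1).foldl
    (pvStepA time_series threshold) ([], none)
  match r.2 with
  | some s => r.1 ++ [(s, (time_series.length : Int) - 1)]
  | none => r.1

-- ===== PORT B =====
-- below = [abs(a - b) < threshold for a, b in zip(time_series, time_series[1:])]
def pvMask (time_series : List Int) (threshold : Int) : List Bool :=
  (time_series.zip time_series.tail).map (fun p => decide (|p.1 - p.2| < threshold))

-- the inner while loop: how many further consecutive True entries follow
def pvLeadTrue : List Bool → Nat
  | true :: rest => pvLeadTrue rest + 1
  | _ => 0

-- the outer while loop over the mask, i the current mask index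
def pvScanRuns : List Bool → Int → List (Int × Int)
  | [], _ => []
  | false :: rest, i => pvScanRuns rest (i + 1)
  | true :: rest, i =>
      let k := pvLeadTrue rest
      (i, i + (k : Int) + 1) :: pvScanRuns (rest.drop (k + 1)) (i + (k : Int) + 2)
termination_by l _ => l.length
decreasing_by all_goals simp

def identify_plateaus_alt (time_series : List Int) (threshold : Int) : List (Int × Int) :=
  pvScanRuns (pvMask time_series threshold) 0

-- ===== PRECONDITION & SPEC =====
def Spec_identify_plateaus (time_series : List Int) (threshold : Int) (out : List (Int × Int)) : Prop := out = identify_plateaus_alt time_series threshold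
instance (time_series : List Int) (threshold : Int) (out : List (Int × Int)) : Decidable (Spec_identify_plateaus time_series threshold out) := by unfold Spec_identify_plateaus; infer_instance

-- ===== CLAIM (what is proved, stated in full; the proofs are below) =====
def Claim_equal_identify_plateaus : Prop := ∀ (time_series : List Int) (threshold : Int), Dom_identify_plateaus time_series threshold → Spec_identify_plateaus time_series threshold (identify_plateaus time_series threshold)

-- ===== LEMMAS AND PROOFS =====

-- A's loop re-expressed over the boolean mask (proof helper)
def pvLoopA : List Bool → List (Int × Int) × Option Int → Int → List (Int × Int) × Option Int
  | [], st, _ => st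
  | true :: rest, st, i =>
      pvLoopA rest
        (match st.2 with
        | none => (st.1, some i)
        | some _ => st)
        (i + 1)
  | false :: rest, st, i =>
      pvLoopA rest
        (match st.2 with
        | some s => (st.1 ++ [(s, i)], none)
        | none => st)
        (i + 1)

-- A's finalization step
def pvFin (st : List (Int × Int) × Option Int) (e : Int) : List (Int × Int) :=
  match st.2 with
  | some s => st.1 ++ [(s, e)]
  | none => st.1

lemma pvMask_length (ts : List Int) (thr : Int) :
    (pvMask ts thr).length = ts.length - 1 := by
  simp [pvMask]

lemma pvMask_getElem (ts : List Int) (thr : Int) (j : Nat) (h : j < (pvMask ts thr).length) :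
    (pvMask ts thr)[j] =
      decide (|ts[j]'(by simp [pvMask_length] at h ⊢; omega) -
               ts[j+1]'(by simp [pvMask_length] at h ⊢; omega)| < thr) := by
  simp [pvMask]

lemma pvBridge (ts : List Int) (thr : Int) :
    ∀ (fuel j : Nat) (st : List (Int × Int) × Option Int),
      (pvMask ts thr).length - j ≤ fuel → j ≤ (pvMask ts thr).length →
      (PySem.List.pyRange (j : Int) ((ts.length : Int) - 1) 1).foldl (pvStepA ts thr) st =
        pvLoopA ((pvMask ts thr).drop j) st (j : Int) := by
  intro fuel
  induction fuel with
  | zero =>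
      intro j st hf hj
      have hjl : j = (pvMask ts thr).length := by omega
      have hml := pvMask_length ts thr
      have hnil : PySem.List.pyRange (j : Int) ((ts.length : Int) - 1) 1 = [] := by
        apply PySem.List.pyRange_one_eq_nil
        omega
      rw [hnil, hjl, List.drop_length]
      rfl
  | succ m ih =>
      intro j st hf hj
      by_cases hlt : j < (pvMask ts thr).length
      · have hml := pvMask_length ts thr
        have hjn : (j : Int) < (ts.length : Int) - 1 := by omega
        have h1 : j < ts.length := by omega
        have h2 : j + 1 < ts.length := by omega
        have hg1 : PySem.List.pyGetD ts (j : Int) 0 = ts[j] := by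
          rw [PySem.List.pyGetD_natCast]; simp [List.getD, h1]
        have hg2 : PySem.List.pyGetD ts ((j : Int) + 1) 0 = ts[j + 1] := by
          rw [show ((j : Int) + 1) = ((j + 1 : Nat) : Int) by push_cast; ring,
            PySem.List.pyGetD_natCast]
          simp [List.getD, h2]
        have hmj := pvMask_getElem ts thr j hlt
        have hcast : ((j : Int) + 1) = ((j + 1 : Nat) : Int) := by push_cast; ring
        rw [PySem.List.pyRange_one_cons hjn, List.drop_eq_getElem_cons hlt]
        simp only [List.foldl_cons]
        cases hb : (pvMask ts thr)[j] with
        | true =>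
            have hcond : |ts[j] - ts[j + 1]| < thr := by
              rw [hmj] at hb; exact of_decide_eq_true hb
            have hstep : pvStepA ts thr st (j : Int) =
                (match st.2 with
                | none => (st.1, some (j : Int))
                | some _ => st) := by
              simp only [pvStepA, hg1, hg2, if_pos hcond]
            rw [hstep]
            simp only [pvLoopA]
            rw [hcast]
            exact ih (j + 1) _ (by omega) (by omega)
        | false =>
            have hcond : ¬ |ts[j] - ts[j + 1]| < thr := by
              rw [hmj] at hb; exact of_decide_eq_false hb
            have hstep : pvStepA ts thr st (j : Int) =
                (match st.2 with
                | some s => (st.1 ++ [(s, (j : Int))], none)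
                | none => st) := by
              simp only [pvStepA, hg1, hg2, if_neg hcond]
            rw [hstep]
            simp only [pvLoopA]
            rw [hcast]
            exact ih (j + 1) _ (by omega) (by omega)
      · have hjl : j = (pvMask ts thr).length := by omega
        have hml := pvMask_length ts thr
        have hnil : PySem.List.pyRange (j : Int) ((ts.length : Int) - 1) 1 = [] := by
          apply PySem.List.pyRange_one_eq_nil
          omega
        rw [hnil, hjl, List.drop_length]
        rfl

lemma pvPQ (mask : List Bool) :
    (∀ (i : Int) (acc : List (Int × Int)),
       pvFin (pvLoopA mask (acc, none) i) (i + mask.length) = acc ++ pvScanRuns mask i)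
    ∧ (∀ (i s : Int) (acc : List (Int × Int)),
       pvFin (pvLoopA mask (acc, some s) i) (i + mask.length) =
         acc ++ (s, i + (pvLeadTrue mask : Int)) ::
           pvScanRuns (mask.drop (pvLeadTrue mask + 1)) (i + (pvLeadTrue mask : Int) + 1)) := by
  induction mask with
  | nil =>
      constructor
      · intro i acc; simp [pvLoopA, pvFin, pvScanRuns]
      · intro i s acc; simp [pvLoopA, pvFin, pvScanRuns, pvLeadTrue]
  | cons b rest ih =>
      obtain ⟨ihP, ihQ⟩ := ih
      have hlen : ∀ i : Int, i + ((b :: rest).length : Int) = (i + 1) + (rest.length : Int) := by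
        intro i; simp; ring
      constructor
      · intro i acc
        cases b with
        | false =>
            simp only [pvLoopA, pvScanRuns]
            rw [hlen i]
            exact ihP (i + 1) acc
        | true =>
            simp only [pvLoopA, pvScanRuns]
            rw [hlen i, ihQ (i + 1) i acc]
            rw [show (i + 1) + (pvLeadTrue rest : Int) = i + (pvLeadTrue rest : Int) + 1 from by ring]
            rw [show i + (pvLeadTrue rest : Int) + 1 + 1 = i + (pvLeadTrue rest : Int) + 2 from by ring]
      · intro i s acc
        cases b with
        | false =>
            simp only [pvLoopA, pvLeadTrue]
            rw [hlen i, ihP (i + 1) (acc ++ [(s, i)])]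
            simp
        | true =>
            simp only [pvLoopA, pvLeadTrue]
            rw [hlen i, ihQ (i + 1) s acc]
            simp only [List.drop_succ_cons]
            rw [show (i + 1) + (pvLeadTrue rest : Int) = i + ((pvLeadTrue rest + 1 : Nat) : Int) from by
              push_cast; ring]

lemma pv_main (ts : List Int) (thr : Int) :
    identify_plateaus ts thr = identify_plateaus_alt ts thr := by
  cases ts with
  | nil =>
      simp [identify_plateaus, identify_plateaus_alt, pvMask, pvScanRuns, PySem.List.pyRange_one_eq_nil]
  | cons x xs =>
      have hml := pvMask_length (x :: xs) thr
      have hfold := pvBridge (x :: xs) thr (pvMask (x :: xs) thr).length 0 ([], none)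
        (by omega) (by omega)
      have hP := (pvPQ (pvMask (x :: xs) thr)).1 0 []
      show pvFin ((PySem.List.pyRange 0 (((x :: xs).length : Int) - 1) 1).foldl
        (pvStepA (x :: xs) thr) ([], none)) (((x :: xs).length : Int) - 1) =
        identify_plateaus_alt (x :: xs) thr
      norm_num at hfold hP
      rw [show (((x :: xs).length : Int) - 1) = (xs.length : Int) from by
        push_cast [List.length_cons]; ring]
      rw [hfold]
      rw [show ((xs.length : Int)) = ((pvMask (x :: xs) thr).length : Int) from by simp [hml]]
      rw [hP]
      simp [identify_plateaus_alt]

-- ===== VERDICT (by name: the statement is the Claim_ definition above) =====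
theorem identify_plateaus_spec : Claim_equal_identify_plateaus := by
  intro ts thr _
  unfold Spec_identify_plateaus
  exact pv_main ts thr
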